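-- pv_equiv track=rewrite | github.com/basilsaji-ril/ec2-api | ec2api/metadata/api.py | _cut_down_to_version
-- ===== SOURCE A (Python) =====
-- import itertools
--
-- VERSIONS = [
--     '1.0',
--     '2007-01-19',
--     '2007-03-01',
--     '2007-08-29',
--     '2007-10-10',
--     '2007-12-15',
--     '2008-02-01',
--     '2008-09-01',
--     '2009-04-04',
-- ]
--
-- VERSION_DATA = {
--     '1.0': ['ami-id',
--             'ami-launch-index',
--             'ami-manifest-path',
--             'hostname',
--             'instance-id',
--             'local-ipv4',
--             'public-keys',
--             'reservation-id',
--             'security-groups'],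
--     '2007-01-19': ['local-hostname',
--                    'public-hostname',
--                    'public-ipv4'],
--     '2007-03-01': ['product-codes'],
--     '2007-08-29': ['instance-type'],
--     '2007-10-10': ['ancestor-ami-ids',
--                    'ramdisk-id'],
--     '2007-12-15': ['block-device-mapping'],
--     '2008-02-01': ['kernel-id',
--                    'placement'],
--     '2008-09-01': ['instance-action'],
--     '2009-04-04': [],
-- }
--
-- def _cut_down_to_version(metadata, version):
--     version_number = VERSIONS.index(version) + 1
--     if version_number == len(VERSIONS):
--         return metadata
--     return dict((attr, metadata[attr])
--                 for attr in itertools.chain(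
--                         *(VERSION_DATA[ver]
--                           for ver in VERSIONS[:version_number]))
--                 if attr in metadata)
-- ===== SOURCE B (Python) =====
-- VERSIONS = [
--     '1.0',
--     '2007-01-19',
--     '2007-03-01',
--     '2007-08-29',
--     '2007-10-10',
--     '2007-12-15',
--     '2008-02-01',
--     '2008-09-01',
--     '2009-04-04',
-- ]
--
-- VERSION_DATA = {
--     '1.0': ['ami-id',
--             'ami-launch-index',
--             'ami-manifest-path',
--             'hostname',
--             'instance-id',
--             'local-ipv4',
--             'public-keys',
--             'reservation-id',
--             'security-groups'],
--     '2007-01-19': ['local-hostname',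
--                    'public-hostname',
--                    'public-ipv4'],
--     '2007-03-01': ['product-codes'],
--     '2007-08-29': ['instance-type'],
--     '2007-10-10': ['ancestor-ami-ids',
--                    'ramdisk-id'],
--     '2007-12-15': ['block-device-mapping'],
--     '2008-02-01': ['kernel-id',
--                    'placement'],
--     '2008-09-01': ['instance-action'],
--     '2009-04-04': [],
-- }
--
-- # Precomputed once at import time: every attribute in table order with its rank,
-- # and for each version the number of attributes available up to it.
-- _FLAT_ATTRS = [a for ver in VERSIONS for a in VERSION_DATA[ver]]
-- ATTR_RANK = {attr: i for i, attr in enumerate(_FLAT_ATTRS)}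
-- CUTOFF = {}
-- _count = 0
-- for _ver in VERSIONS:
--     _count += len(VERSION_DATA[_ver])
--     CUTOFF[_ver] = _count
--
--
-- def _cut_down_to_version(metadata, version):
--     if version == VERSIONS[-1]:
--         return metadata
--     cutoff = CUTOFF[version]
--     picked = [(k, v) for k, v in metadata.items()
--               if ATTR_RANK.get(k, cutoff) < cutoff]
--     picked.sort(key=lambda kv: ATTR_RANK[kv[0]])
--     return dict(picked)
-- ===== Notes on version B (the rewrite author's own statement) =====
-- stated objective: alternative
-- what changed: A scans the attribute table (index + slice + itertools.chain) probing the metadata dict per attribute; B precomputes at import time a rank table and per-version cutoffs, filters the metadata items in one pass against the rank cutoff and restores table order with a sort by rank.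
import Mathlib
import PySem

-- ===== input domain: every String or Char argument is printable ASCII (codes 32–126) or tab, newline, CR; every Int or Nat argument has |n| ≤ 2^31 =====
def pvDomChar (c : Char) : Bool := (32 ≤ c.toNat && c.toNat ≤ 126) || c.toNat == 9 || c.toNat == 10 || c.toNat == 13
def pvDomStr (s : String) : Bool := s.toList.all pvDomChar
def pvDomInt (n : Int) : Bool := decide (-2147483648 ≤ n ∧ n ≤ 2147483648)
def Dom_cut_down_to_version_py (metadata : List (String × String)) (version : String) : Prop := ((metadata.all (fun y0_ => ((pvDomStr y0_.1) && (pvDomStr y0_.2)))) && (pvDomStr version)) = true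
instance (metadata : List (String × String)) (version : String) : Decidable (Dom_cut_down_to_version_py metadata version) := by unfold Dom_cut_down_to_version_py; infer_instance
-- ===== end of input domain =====

-- B replaces A's scan of the attribute table (index + slice + itertools.chain + per-attr dict lookup)
-- by a one-pass filter of the metadata items against a precomputed attribute-rank table, restoring the
-- table order with a sort by rank; an alternative decomposition of the same linear-cost task.


-- shared module-level constants VERSIONS and VERSION_DATA
def pvVersions : List String :=
  ["1.0", "2007-01-19", "2007-03-01", "2007-08-29", "2007-10-10",
   "2007-12-15", "2008-02-01", "2008-09-01", "2009-04-04"]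

def pvVersionData : PySem.Dict String (List String) := PySem.Dict.ofList
  [("1.0", ["ami-id", "ami-launch-index", "ami-manifest-path", "hostname", "instance-id",
            "local-ipv4", "public-keys", "reservation-id", "security-groups"]),
   ("2007-01-19", ["local-hostname", "public-hostname", "public-ipv4"]),
   ("2007-03-01", ["product-codes"]),
   ("2007-08-29", ["instance-type"]),
   ("2007-10-10", ["ancestor-ami-ids", "ramdisk-id"]),
   ("2007-12-15", ["block-device-mapping"]),
   ("2008-02-01", ["kernel-id", "placement"]),
   ("2008-09-01", ["instance-action"]),
   ("2009-04-04", [])]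

-- dict lookup on the metadata association list: first match (metadata is a Python dict,
-- so under Pre_ its keys are distinct)
def pvLookup : List (String × String) → String → Option String
  | [], _ => none
  | p :: t, k => if p.1 == k then some p.2 else pvLookup t k

-- ===== PORT A =====
def cut_down_to_version_py (metadata : List (String × String)) (version : String) : List (String × String) :=
  match PySem.List.index? pvVersions version with
  | none => []   -- VERSIONS.index raises ValueError; excluded by Pre_
  | some i =>
    let version_number : Int := (i : Int) + 1
    if version_number = (pvVersions.length : Int) then metadata
    else
      -- itertools.chain(*(VERSION_DATA[ver] for ver in VERSIONS[:version_number]))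
      let chain := (PySem.List.slice pvVersions none (some version_number)).flatMap
        (fun ver => (pvVersionData.get? ver).getD [])   -- KeyError impossible: constants
      -- dict((attr, metadata[attr]) for attr in chain if attr in metadata)
      ((chain.filterMap (fun attr => (pvLookup metadata attr).map (fun v => (attr, v)))).foldl
        (fun (d : PySem.Dict String String) p => d.insert p.1 p.2) PySem.Dict.empty).items

-- ===== PORT B =====
-- _FLAT_ATTRS = [a for ver in VERSIONS for a in VERSION_DATA[ver]]
def pvFlatAttrs : List String :=
  pvVersions.flatMap (fun ver => (pvVersionData.get? ver).getD [])

-- ATTR_RANK = {attr: i for i, attr in enumerate(_FLAT_ATTRS)}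
def pvAttrRank : PySem.Dict String Int :=
  (PySem.List.enumerate pvFlatAttrs 0).foldl
    (fun (d : PySem.Dict String Int) p => d.insert p.2 p.1) PySem.Dict.empty

-- CUTOFF = {}; _count = 0; for _ver in VERSIONS: _count += len(...); CUTOFF[_ver] = _count
def pvCutoff : PySem.Dict String Int :=
  (pvVersions.foldl
    (fun (s : PySem.Dict String Int × Int) ver =>
      let c := s.2 + (((pvVersionData.get? ver).getD []).length : Int)
      (s.1.insert ver c, c))
    (PySem.Dict.empty, 0)).1

def cut_down_to_version_py_alt (metadata : List (String × String)) (version : String) : List (String × String) :=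
  if PySem.List.pyGet? pvVersions (-1) = some version then metadata
  else
    match pvCutoff.get? version with
    | none => []   -- CUTOFF[version] raises KeyError; excluded by Pre_
    | some cutoff =>
      let picked := metadata.filter (fun kv => decide (pvAttrRank.getD kv.1 cutoff < cutoff))
      -- picked.sort(key=lambda kv: ATTR_RANK[kv[0]]); dict(picked)
      -- (sort key via getD 0: every picked key is in ATTR_RANK, so KeyError is impossible)
      ((PySem.List.sorted picked (fun kv => pvAttrRank.getD kv.1 0) false).foldl
        (fun (d : PySem.Dict String String) p => d.insert p.1 p.2) PySem.Dict.empty).items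

-- ===== PRECONDITION & SPEC =====
-- Pre_ excludes versions not in VERSIONS (there A raises ValueError) and metadata lists with
-- duplicate keys: the parameter is a Python dict, which cannot hold two entries with the same key,
-- so such association lists do not represent any actual input of A.
def Pre_cut_down_to_version_py (metadata : List (String × String)) (version : String) : Prop :=
  version ∈ pvVersions ∧ (metadata.map Prod.fst).Nodup

instance (metadata : List (String × String)) (version : String) : Decidable (Pre_cut_down_to_version_py metadata version) := by
  unfold Pre_cut_down_to_version_py; infer_instance

def pvWitness_cut_down_to_version_py : (List (String × String)) × String :=
  ([("hostname", "h1"), ("kernel-id", "k"), ("foo", "x")], "2007-01-19")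

def Spec_cut_down_to_version_py (metadata : List (String × String)) (version : String) (out : List (String × String)) : Prop := out = cut_down_to_version_py_alt metadata version
instance (metadata : List (String × String)) (version : String) (out : List (String × String)) : Decidable (Spec_cut_down_to_version_py metadata version out) := by unfold Spec_cut_down_to_version_py; infer_instance

-- ===== CLAIM (what is proved, stated in full; the proofs are below) =====
def Claim_equal_cut_down_to_version_py : Prop := ∀ (metadata : List (String × String)) (version : String), Dom_cut_down_to_version_py metadata version → Pre_cut_down_to_version_py metadata version → Spec_cut_down_to_version_py metadata version (cut_down_to_version_py metadata version)

-- ===== LEMMAS AND PROOFS =====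

-- pvLookup finds nothing iff the key is absent
lemma pvLookup_eq_none_iff (md : List (String × String)) (k : String) :
    pvLookup md k = none ↔ k ∉ md.map Prod.fst := by
  induction md with
  | nil => simp [pvLookup]
  | cons p t ih =>
    simp only [pvLookup, List.map_cons, List.mem_cons, not_or]
    by_cases h : p.1 = k
    · simp [h]
    · rw [if_neg (by simpa using h), ih]
      have hne : ¬ k = p.1 := fun hh => h hh.symm
      simp [hne]

-- a member of a Nodup list lies in its c-prefix iff its index is below c
lemma mem_take_iff_lt (L : List String) (hnd : L.Nodup) (i : Nat) (hi : i < L.length) (c : Nat) :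
    L[i] ∈ L.take c ↔ i < c := by
  constructor
  · intro hmem
    obtain ⟨j, hj, hLj⟩ := List.getElem_of_mem hmem
    have hjlen : j < L.length := lt_of_lt_of_le hj (by simp)
    have hjc : j < c := by
      have := hj; simp [List.length_take] at this; omega
    have : L[j] = L[i] := by
      rw [← hLj]; exact (List.getElem_take).symm
    have := (List.Nodup.getElem_inj_iff hnd).mp this
    omega
  · intro hc
    have hlt : i < (L.take c).length := by simp [List.length_take]; omega
    have : (L.take c)[i] = L[i] := List.getElem_take
    rw [← this]; exact List.getElem_mem hlt

-- ATTR_RANK as a literal items list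
lemma pvAttrRank_items :
    pvAttrRank.items = (PySem.List.enumerate pvFlatAttrs 0).map (fun p => (p.2, p.1)) := by
  decide

lemma pvAttrRank_keys_nodup : pvAttrRank.keys.Nodup := by decide

-- the rank of the i-th flat attribute is i, whatever the getD default
lemma pvAttrRank_getD_at (i : Nat) (hi : i < pvFlatAttrs.length) (d : Int) :
    pvAttrRank.getD pvFlatAttrs[i] d = (i : Int) := by
  have hmem : (pvFlatAttrs[i], (i : Int)) ∈ pvAttrRank.items := by
    rw [pvAttrRank_items]
    have : ((i : Int), pvFlatAttrs[i]) ∈ PySem.List.enumerate pvFlatAttrs 0 := by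
      rw [PySem.List.mem_enumerate_iff]
      exact ⟨i, hi, by simp⟩
    exact List.mem_map_of_mem this
  exact PySem.Dict.getD_of_mem_items pvAttrRank hmem pvAttrRank_keys_nodup d

lemma pvFlatAttrs_nodup : pvFlatAttrs.Nodup := by decide

-- rank below cutoff ⟺ membership in the cutoff-prefix of the flat attribute list
lemma rank_lt_iff (k : String) (c : Nat) :
    pvAttrRank.getD k (c : Int) < (c : Int) ↔ k ∈ pvFlatAttrs.take c := by
  by_cases hk : k ∈ pvFlatAttrs
  · obtain ⟨i, hi, hik⟩ := List.mem_iff_getElem.mp hk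
    subst hik
    rw [pvAttrRank_getD_at i hi]
    rw [mem_take_iff_lt pvFlatAttrs pvFlatAttrs_nodup i hi c]
    exact_mod_cast Iff.rfl
  · have hcont : pvAttrRank.contains k = false := by
      have hkeys : pvAttrRank.keys = pvFlatAttrs := by decide
      rw [PySem.Dict.contains_eq_decide_mem_keys, hkeys]
      simp [hk]
    rw [PySem.Dict.getD_of_not_contains pvAttrRank (c : Int) hcont]
    simp only [lt_self_iff_false, false_iff]
    intro hmem
    exact hk (List.mem_of_mem_take hmem)

-- inserting the binding of a fresh key x ∈ L into the filterMap permutes it to the front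
lemma filterMap_if_perm (x : String) (y : String × String)
    (f : String → Option (String × String)) (hfx : f x = none) :
    ∀ (L : List String), L.Nodup → x ∈ L →
    (L.filterMap (fun a => if a = x then some y else f a)).Perm (y :: L.filterMap f) := by
  intro L
  induction L with
  | nil => intro _ h; simp at h
  | cons a t ih =>
    intro hnd hx
    rcases List.nodup_cons.mp hnd with ⟨hat, hndt⟩
    by_cases hax : a = x
    · subst hax
      have hcongr : t.filterMap (fun b => if b = a then some y else f b) = t.filterMap f := by
        apply List.filterMap_congr
        intro b hb
        have : b ≠ a := fun h => hat (h ▸ hb)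
        simp [this]
      simp [hcongr, hfx]
    · have hxt : x ∈ t := by
        rcases List.mem_cons.mp hx with h | h
        · exact absurd h.symm hax
        · exact h
      have hperm := ih hndt hxt
      simp only [List.filterMap_cons, hax, if_false]
      cases hfa : f a with
      | none => exact hperm
      | some b =>
        exact hperm.cons b |>.trans (List.Perm.swap y b _)

-- scanning the attribute list L and looking each attr up in metadata is a permutation of
-- filtering metadata by membership of its key in L (metadata keys distinct, L distinct)
lemma filterMap_lookup_perm (L : List String) (hL : L.Nodup) :
    ∀ (md : List (String × String)), (md.map Prod.fst).Nodup →
    (L.filterMap (fun a => (pvLookup md a).map (fun v => (a, v)))).Perm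
      (md.filter (fun kv => decide (kv.1 ∈ L))) := by
  intro md
  induction md with
  | nil => simp [pvLookup]
  | cons p t ih =>
    intro hnd
    have hnd' : (p.1 :: t.map Prod.fst).Nodup := by simpa using hnd
    have hpt : p.1 ∉ t.map Prod.fst := (List.nodup_cons.mp hnd').1
    have hndt : (t.map Prod.fst).Nodup := (List.nodup_cons.mp hnd').2
    have hftx : (fun a => (pvLookup t a).map (fun v => (a, v))) p.1 = none := by
      show (pvLookup t p.1).map (fun v => (p.1, v)) = none
      rw [(pvLookup_eq_none_iff t p.1).mpr hpt]
      rfl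
    have hcongr : L.filterMap (fun a => (pvLookup (p :: t) a).map (fun v => (a, v)))
        = L.filterMap (fun a => if a = p.1 then some (p.1, p.2) else (pvLookup t a).map (fun v => (a, v))) := by
      apply List.filterMap_congr
      intro a _
      by_cases h : a = p.1
      · subst h
        simp [pvLookup]
      · simp only [pvLookup]
        rw [if_neg (by simpa using fun hh : p.1 = a => h hh.symm), if_neg h]
    rw [hcongr]
    by_cases hpL : p.1 ∈ L
    · have hperm := filterMap_if_perm p.1 (p.1, p.2)
        (fun a => (pvLookup t a).map (fun v => (a, v))) hftx L hL hpL
      refine hperm.trans ?_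
      have hf : (p :: t).filter (fun kv => decide (kv.1 ∈ L))
          = p :: t.filter (fun kv => decide (kv.1 ∈ L)) := by
        simp [hpL]
      rw [hf]
      have h2 := (ih hndt).cons (p.1, p.2)
      simpa using h2
    · have hcongr2 : L.filterMap (fun a => if a = p.1 then some (p.1, p.2) else (pvLookup t a).map (fun v => (a, v)))
          = L.filterMap (fun a => (pvLookup t a).map (fun v => (a, v))) := by
        apply List.filterMap_congr
        intro a ha
        rw [if_neg (fun h : a = p.1 => hpL (h ▸ ha))]
      have hf : (p :: t).filter (fun kv => decide (kv.1 ∈ L))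
          = t.filter (fun kv => decide (kv.1 ∈ L)) := by
        simp [hpL]
      rw [hcongr2, hf]
      exact ih hndt

-- the prefix of the flat attribute list is strictly increasing in rank
lemma take_pairwise_rank (c : Nat) :
    (pvFlatAttrs.take c).Pairwise
      (fun a b => pvAttrRank.getD a 0 < pvAttrRank.getD b 0) := by
  rw [List.pairwise_iff_getElem]
  intro i j hi hj hij
  have hlen : (pvFlatAttrs.take c).length ≤ pvFlatAttrs.length := by simp [List.length_take]
  have hi' : i < pvFlatAttrs.length := lt_of_lt_of_le hi hlen
  have hj' : j < pvFlatAttrs.length := lt_of_lt_of_le hj hlen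
  have e1 : (pvFlatAttrs.take c)[i] = pvFlatAttrs[i] := List.getElem_take
  have e2 : (pvFlatAttrs.take c)[j] = pvFlatAttrs[j] := List.getElem_take
  rw [e1, e2, pvAttrRank_getD_at i hi', pvAttrRank_getD_at j hj']
  exact_mod_cast hij

-- master lemma: for any cutoff prefix, A's chain-scan list IS B's sorted filtered list
lemma master (md : List (String × String)) (hnd : (md.map Prod.fst).Nodup)
    (c : Nat) :
    PySem.List.sorted (md.filter (fun kv => decide (pvAttrRank.getD kv.1 (c : Int) < (c : Int))))
        (fun kv => pvAttrRank.getD kv.1 0) false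
      = (pvFlatAttrs.take c).filterMap (fun attr => (pvLookup md attr).map (fun v => (attr, v))) := by
  have hfilter : md.filter (fun kv => decide (pvAttrRank.getD kv.1 (c : Int) < (c : Int)))
      = md.filter (fun kv => decide (kv.1 ∈ pvFlatAttrs.take c)) := by
    apply List.filter_congr
    intro kv _
    simp only [decide_eq_decide]
    exact rank_lt_iff kv.1 c
  rw [hfilter]
  apply PySem.List.sorted_eq_of_perm_of_pairwise_lt
  · exact filterMap_lookup_perm (pvFlatAttrs.take c)
      (List.Nodup.sublist (List.take_sublist c pvFlatAttrs) pvFlatAttrs_nodup) md hnd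
  · rw [List.pairwise_filterMap]
    apply (take_pairwise_rank c).imp_of_mem
    intro a b _ _ hab p hp q hq
    cases hLa : pvLookup md a with
    | none => rw [hLa] at hp; simp at hp
    | some v =>
      cases hLb : pvLookup md b with
      | none => rw [hLb] at hq; simp at hq
      | some w =>
        rw [hLa] at hp; rw [hLb] at hq
        simp at hp hq
        rw [← hp, ← hq]
        exact hab

-- one non-final version: A's branch equals B's branch once the constant tables are evaluated
lemma case_lemma (metadata : List (String × String)) (hnd : (metadata.map Prod.fst).Nodup)
    (v : String) (i : Nat) (c : Nat)
    (hi : PySem.List.index? pvVersions v = some i)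
    (hne : ¬ ((i : Int) + 1 = (pvVersions.length : Int)))
    (hlast : ¬ (PySem.List.pyGet? pvVersions (-1) = some v))
    (hcut : pvCutoff.get? v = some (c : Int))
    (hchain : (PySem.List.slice pvVersions none (some ((i : Int) + 1))).flatMap
        (fun ver => (pvVersionData.get? ver).getD []) = pvFlatAttrs.take c) :
    cut_down_to_version_py metadata v = cut_down_to_version_py_alt metadata v := by
  have hm := master metadata hnd c
  simp only [cut_down_to_version_py, cut_down_to_version_py_alt, hi, hcut]
  rw [if_neg hne, if_neg hlast, hchain, hm]

-- ===== VERDICT (by name: the statement is the Claim_ definition above) =====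
theorem cut_down_to_version_py_spec : Claim_equal_cut_down_to_version_py := by
  intro metadata version _ hpre
  rcases hpre with ⟨hv, hnd⟩
  unfold Spec_cut_down_to_version_py
  have hv' : version = "1.0" ∨ version = "2007-01-19" ∨ version = "2007-03-01" ∨
      version = "2007-08-29" ∨ version = "2007-10-10" ∨ version = "2007-12-15" ∨
      version = "2008-02-01" ∨ version = "2008-09-01" ∨ version = "2009-04-04" := by
    simpa [pvVersions] using hv
  rcases hv' with rfl | rfl | rfl | rfl | rfl | rfl | rfl | rfl | rfl
  · exact case_lemma metadata hnd "1.0" 0 9 (by decide) (by decide) (by decide) (by decide) (by decide)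
  · exact case_lemma metadata hnd "2007-01-19" 1 12 (by decide) (by decide) (by decide) (by decide) (by decide)
  · exact case_lemma metadata hnd "2007-03-01" 2 13 (by decide) (by decide) (by decide) (by decide) (by decide)
  · exact case_lemma metadata hnd "2007-08-29" 3 14 (by decide) (by decide) (by decide) (by decide) (by decide)
  · exact case_lemma metadata hnd "2007-10-10" 4 16 (by decide) (by decide) (by decide) (by decide) (by decide)
  · exact case_lemma metadata hnd "2007-12-15" 5 17 (by decide) (by decide) (by decide) (by decide) (by decide)
  · exact case_lemma metadata hnd "2008-02-01" 6 19 (by decide) (by decide) (by decide) (by decide) (by decide)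
  · exact case_lemma metadata hnd "2008-09-01" 7 20 (by decide) (by decide) (by decide) (by decide) (by decide)
  · have h8 : List.idxOf? "2009-04-04" pvVersions = some 8 := by decide
    have h9 : pvVersions.length = 9 := by decide
    norm_num [cut_down_to_version_py, cut_down_to_version_py_alt, h8, h9,
      show PySem.List.pyGet? pvVersions (-1) = some "2009-04-04" from by decide]
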